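-- pv_equiv track=rewrite | github.com/KUR-creative/ads_mini_suffix_array | SufArray.py | lcp_find
-- ===== SOURCE A (Python) =====
-- def len_lcp(s1, s2):
--     length = 0
--     for c1,c2 in zip(s1,s2):
--         if c1 == c2:
--             length += 1
--         else:
--             break
--     return length
--
-- def lcp_find(strs, qstr, lr):
--     l = 0; r = len(strs)# - 1
--     lcp_l = lcp_r = min_lcp = 0
--     while l + 1 != r:
--         m = (r - l) // 2 + l
--         min_lcp = min(lcp_l, lcp_r)
--         qstring = qstr[min_lcp:]
--         string = strs[m][min_lcp:]
--         if qstring < string: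
--             r = m
--             lcp_r = min_lcp + len_lcp(qstring, string)
--         else:
--             l = m
--             lcp_l = min_lcp + len_lcp(qstring, string)
--     return r if lr == 'l' else l
-- ===== SOURCE B (Python) =====
-- def lcp_find(strs, qstr, lr):
--     def go(l, r, lcp_l, lcp_r):
--         if l + 1 == r:
--             return r if lr == 'l' else l
--         m = l + (r - l) // 2
--         j = min(lcp_l, lcp_r)
--         s = strs[m]
--         while j < len(qstr) and j < len(s) and qstr[j] == s[j]:
--             j += 1
--         if j < len(s) and (j >= len(qstr) or qstr[j] < s[j]):
--             return go(l, m, lcp_l, j)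
--         else:
--             return go(m, r, j, lcp_r)
--     return go(0, len(strs), 0, 0)
-- ===== Notes on version B (the rewrite author's own statement) =====
-- stated objective: alternative
-- what changed: B replaces A's per-step slicing, Python string comparison of the sliced suffixes and separate len_lcp re-scan by a single fused index scan that yields both the comparison outcome and the new lcp value, and recasts the while loop as recursion without the min_lcp/slice bookkeeping.
import Mathlib
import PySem

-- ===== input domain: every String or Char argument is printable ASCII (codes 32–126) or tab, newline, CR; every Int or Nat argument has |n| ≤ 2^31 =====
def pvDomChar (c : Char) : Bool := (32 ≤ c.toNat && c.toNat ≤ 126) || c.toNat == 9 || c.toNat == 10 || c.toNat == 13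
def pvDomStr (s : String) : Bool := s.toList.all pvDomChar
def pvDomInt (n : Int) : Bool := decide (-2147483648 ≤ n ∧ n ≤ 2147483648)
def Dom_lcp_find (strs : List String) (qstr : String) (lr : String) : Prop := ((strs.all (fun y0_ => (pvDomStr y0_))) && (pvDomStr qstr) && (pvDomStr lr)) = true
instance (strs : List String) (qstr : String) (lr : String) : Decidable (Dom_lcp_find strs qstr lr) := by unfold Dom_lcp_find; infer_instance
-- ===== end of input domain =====

-- B replaces A's slice-and-rescan step (Python '<' on sliced suffixes plus a separate
-- len_lcp pass) by one fused index scan computing order and lcp together, and recasts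
-- the while loop as recursion; objective: alternative (same asymptotic cost).

-- ===== PORT A =====
-- Python string '<' (lexicographic by code point), on char lists
def pyLtChars : List Char → List Char → Bool
  | _, [] => false
  | [], _ :: _ => true
  | a :: as, b :: bs => if a < b then true else if a = b then pyLtChars as bs else false

-- port of len_lcp (zip-and-count-equal-prefix)
def lenLcp : List Char → List Char → Nat
  | a :: as, b :: bs => if a = b then 1 + lenLcp as bs else 0
  | _, _ => 0

-- A's while loop; state (l, r, lcp_l, lcp_r); the `r ≤ l` and `none` arms are
-- unreachable totality guards (Python raises IndexError only when strs = [])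
def lcpLoopA (strs : List String) (qstr : List Char) (l r lcpl lcpr : Nat) : Nat × Nat :=
  if l + 1 = r then (l, r)
  else if r ≤ l then (l, r)
  else
    let m := (r - l) / 2 + l
    match strs[m]? with
    | none => (l, r)
    | some s =>
      let minLcp := min lcpl lcpr
      let qstring := qstr.drop minLcp
      let string := s.toList.drop minLcp
      if pyLtChars qstring string then
        lcpLoopA strs qstr l m lcpl (minLcp + lenLcp qstring string)
      else
        lcpLoopA strs qstr m r (minLcp + lenLcp qstring string) lcpr
termination_by r - l
decreasing_by all_goals omega

def lcp_find (strs : List String) (qstr : String) (lr : String) : Int :=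
  let p := lcpLoopA strs qstr.toList 0 strs.length 0 0
  if lr = "l" then (p.2 : Int) else (p.1 : Int)

-- ===== PORT B =====
-- B's inner while loop: advance j while both strings have an equal char at j
def scanB (q s : List Char) (j : Nat) : Nat :=
  if hq : j < q.length then
    if hs : j < s.length then
      if q[j] = s[j] then scanB q s (j + 1) else j
    else j
  else j
termination_by q.length - j

-- B's recursive binary search; the `r ≤ l` / `none` arms are unreachable totality guards
def goB (strs : List String) (q : List Char) (lr : String) (l r lcpl lcpr : Nat) : Int :=
  if l + 1 = r then (if lr = "l" then (r : Int) else (l : Int))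
  else if r ≤ l then (if lr = "l" then (r : Int) else (l : Int))
  else
    let m := l + (r - l) / 2
    match strs[m]? with
    | none => (if lr = "l" then (r : Int) else (l : Int))
    | some s =>
      let j := scanB q s.toList (min lcpl lcpr)
      let less :=
        match s.toList[j]? with
        | none => false
        | some c =>
          match q[j]? with
          | none => true
          | some a => decide (a < c)
      if less then goB strs q lr l m lcpl j else goB strs q lr m r j lcpr
termination_by r - l
decreasing_by all_goals omega

def lcp_find_alt (strs : List String) (qstr : String) (lr : String) : Int :=
  goB strs qstr.toList lr 0 strs.length 0 0

-- ===== PRECONDITION & SPEC =====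
-- Pre_ excludes only the empty list, on which Python A raises IndexError (strs[0]).
def Pre_lcp_find (strs : List String) (qstr : String) (lr : String) : Prop := strs ≠ []
instance (strs : List String) (qstr : String) (lr : String) : Decidable (Pre_lcp_find strs qstr lr) := by unfold Pre_lcp_find; infer_instance
def pvWitness_lcp_find : List String × String × String := (["ab", "b"], "b", "l")

def Spec_lcp_find (strs : List String) (qstr : String) (lr : String) (out : Int) : Prop := out = lcp_find_alt strs qstr lr
instance (strs : List String) (qstr : String) (lr : String) (out : Int) : Decidable (Spec_lcp_find strs qstr lr out) := by unfold Spec_lcp_find; infer_instance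

-- ===== CLAIM (what is proved, stated in full; the proofs are below) =====
def Claim_equal_lcp_find : Prop := ∀ (strs : List String) (qstr : String) (lr : String), Dom_lcp_find strs qstr lr → Pre_lcp_find strs qstr lr → Spec_lcp_find strs qstr lr (lcp_find strs qstr lr)

-- ===== LEMMAS AND PROOFS =====

-- the fused scan computes min_lcp + len_lcp of the two suffixes
theorem scanB_eq_lenLcp (q s : List Char) (k : Nat) :
    scanB q s k = k + lenLcp (q.drop k) (s.drop k) := by
  fun_induction scanB q s k with
  | case1 j hq hs heq ih =>
    rw [List.drop_eq_getElem_cons hq, List.drop_eq_getElem_cons hs]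
    simp only [lenLcp, if_pos heq, ih]
    omega
  | case2 j hq hs hne =>
    rw [List.drop_eq_getElem_cons hq, List.drop_eq_getElem_cons hs]
    simp [lenLcp, hne]
  | case3 j hq hs =>
    have hsle : s.length ≤ j := by omega
    rw [List.drop_eq_getElem_cons hq, List.drop_of_length_le hsle]
    simp [lenLcp]
  | case4 j hq =>
    have hqle : q.length ≤ j := by omega
    rw [List.drop_of_length_le hqle]
    simp [lenLcp]

-- A's suffix comparison equals B's one-character test at the scan's stopping point
theorem pyLt_eq_scan_test (q s : List Char) (k : Nat) :
    pyLtChars (q.drop k) (s.drop k) =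
      (match s[scanB q s k]? with
       | none => false
       | some c =>
         match q[scanB q s k]? with
         | none => true
         | some a => decide (a < c)) := by
  fun_induction scanB q s k with
  | case1 j hq hs heq ih =>
    rw [List.drop_eq_getElem_cons hq, List.drop_eq_getElem_cons hs]
    simpa [pyLtChars, heq] using ih
  | case2 j hq hs hne =>
    rw [List.drop_eq_getElem_cons hq, List.drop_eq_getElem_cons hs]
    simp only [List.getElem?_eq_getElem hq, List.getElem?_eq_getElem hs]
    rcases lt_trichotomy q[j] s[j] with h | h | h
    · simp [pyLtChars, h]
    · exact absurd h hne
    · simp [pyLtChars, not_lt.mpr (le_of_lt h), fun hab => hne hab]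
  | case3 j hq hs =>
    have hsle : s.length ≤ j := by omega
    have hsn : s[j]? = none := List.getElem?_eq_none hsle
    rw [List.drop_eq_getElem_cons hq, List.drop_of_length_le hsle]
    simp [pyLtChars, hsn]
  | case4 j hq =>
    have hqle : q.length ≤ j := by omega
    have hqn : q[j]? = none := List.getElem?_eq_none hqle
    rw [List.drop_of_length_le hqle]
    by_cases hsl : j < s.length
    · rw [List.drop_eq_getElem_cons hsl]
      simp [pyLtChars, List.getElem?_eq_getElem hsl, hqn]
    · have hsle : s.length ≤ j := by omega
      have hsn : s[j]? = none := List.getElem?_eq_none hsle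
      rw [List.drop_of_length_le hsle]
      simp [pyLtChars, hsn]

-- the two binary searches move in lockstep on every bracketed state
theorem loop_agree (strs : List String) (qstr : List Char) (lr : String) :
    ∀ d l r lcpl lcpr, r - l ≤ d → l < r → r ≤ strs.length →
      goB strs qstr lr l r lcpl lcpr =
        (if lr = "l" then ((lcpLoopA strs qstr l r lcpl lcpr).2 : Int)
         else ((lcpLoopA strs qstr l r lcpl lcpr).1 : Int)) := by
  intro d
  induction d with
  | zero => intro l r _ _ hd hlr _; omega
  | succ d ih =>
    intro l r lcpl lcpr hd hlr hrn
    rw [goB, lcpLoopA]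
    by_cases hbase : l + 1 = r
    · simp [hbase]
    · have hle : ¬ r ≤ l := by omega
      have hlr2 : l + 2 ≤ r := by omega
      have hm : l + (r - l) / 2 = (r - l) / 2 + l := Nat.add_comm _ _
      have hmlt : (r - l) / 2 + l < strs.length := by omega
      simp only [hbase, hle, if_false, hm]
      rcases hget : strs[(r - l) / 2 + l]? with _ | s
      · exact absurd hget (by simp [List.getElem?_eq_getElem hmlt])
      · simp only []
        rw [pyLt_eq_scan_test qstr s.toList (min lcpl lcpr),
            ← scanB_eq_lenLcp qstr s.toList (min lcpl lcpr)]
        by_cases hlt : (match s.toList[scanB qstr s.toList (min lcpl lcpr)]? with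
            | none => false
            | some c =>
              match qstr[scanB qstr s.toList (min lcpl lcpr)]? with
              | none => true
              | some a => decide (a < c)) = true
        · rw [if_pos hlt, if_pos hlt]
          exact ih l ((r - l) / 2 + l) lcpl _ (by omega) (by omega) (by omega)
        · rw [if_neg hlt, if_neg hlt]
          exact ih ((r - l) / 2 + l) r _ lcpr (by omega) (by omega) (by omega)

-- ===== VERDICT (by name: the statement is the Claim_ definition above) =====
theorem lcp_find_spec : Claim_equal_lcp_find := by
  intro strs qstr lr _ hpre
  unfold Spec_lcp_find lcp_find lcp_find_alt
  have hn : 0 < strs.length := List.length_pos_iff.mpr hpre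
  rw [loop_agree strs qstr.toList lr strs.length 0 strs.length 0 0 (by omega) hn (le_refl _)]
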